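-- pv_equiv track=rewrite | github.com/boknowswiki/mytraning | lintcode/python/0396_coins_in_a_line_III.py | firstWillWin
-- ===== SOURCE A (Python) =====
-- def firstWillWin(values):
--     # write your code here
--     if not values:
--         return False
--
--     n = len(values)
--     dp = [[0] * n for _  in range(n)]
--     sum = [[0] * n for _  in range(n)]
--
--     for i in range(n):
--         dp[i][i] = values[i]
--         sum[i][i] = values[i]
--
--     for i in range(n - 2, -1, -1):  # n-2 => 0
--         for j in range(i + 1, n):  # i+1 => n-1
--             sum[i][j] = sum[i + 1][j] + values[i]
--             dp[i][j] = sum[i][j] - min(dp[i + 1][j], dp[i][j - 1])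
--
--     return dp[0][n - 1] > sum[0][n - 1] - dp[0][n - 1]
-- ===== SOURCE B (Python) =====
-- def firstWillWin(values):
--     if not values:
--         return False
--     n = len(values)
--     # Demand-driven top-down evaluation with an explicit stack:
--     # memo[(i, j)] = net score advantage of the player to move on values[i..j].
--     memo = {}
--     stack = [(0, n - 1)]
--     while stack:
--         i, j = stack[-1]
--         if i == j:
--             memo[(i, j)] = values[i]
--             stack.pop()
--             continue
--         need = []
--         if (i + 1, j) not in memo:
--             need.append((i + 1, j))
--         if (i, j - 1) not in memo:
--             need.append((i, j - 1))
--         if need: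
--             stack.extend(need)
--         else:
--             memo[(i, j)] = max(values[i] - memo[(i + 1, j)],
--                                values[j] - memo[(i, j - 1)])
--             stack.pop()
--     return memo[(0, n - 1)] > 0
-- ===== Notes on version B (the rewrite author's own statement) =====
-- stated objective: alternative
-- what changed: Replaces A's bottom-up fill of two n-by-n tables (first-player total score plus interval-sum matrix) with a demand-driven top-down evaluation: an explicit stack drives a depth-first walk over the interval DAG and a dictionary memoises the net score advantage of the player to move, so the sum matrix and the nested index loops disappear.
import Mathlib
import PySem

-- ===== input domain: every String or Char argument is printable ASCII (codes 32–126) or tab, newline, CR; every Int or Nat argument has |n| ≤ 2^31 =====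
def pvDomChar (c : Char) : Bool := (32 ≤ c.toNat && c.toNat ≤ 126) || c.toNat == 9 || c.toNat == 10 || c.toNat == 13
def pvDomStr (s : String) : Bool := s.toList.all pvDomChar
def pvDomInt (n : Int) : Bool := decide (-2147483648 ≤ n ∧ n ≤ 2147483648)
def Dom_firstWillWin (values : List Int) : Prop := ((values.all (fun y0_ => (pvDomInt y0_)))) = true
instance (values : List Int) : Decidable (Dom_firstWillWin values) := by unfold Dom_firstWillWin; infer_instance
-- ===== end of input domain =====

-- B replaces A's bottom-up fill of two n×n tables (first-player score dp plus interval-sum table)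
-- by a demand-driven top-down evaluation: an explicit stack drives a depth-first walk of the
-- interval DAG, memoising the NET advantage of the player to move in a dictionary; objective: alternative.

-- ===== PORT A =====
-- A-side helpers: nested-list read m[i][j] and write m[i][j] = x, and the three loop bodies of A.
def pvGet2 (m : List (List Int)) (i j : Int) : Int :=
  PySem.List.pyGetD (PySem.List.pyGetD m i []) j 0

def pvSet2 (m : List (List Int)) (i j : Int) (x : Int) : List (List Int) :=
  PySem.List.pySetD m i (PySem.List.pySetD (PySem.List.pyGetD m i []) j x)

-- body of "for i in range(n): dp[i][i] = values[i]; sum[i][i] = values[i]"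
def pvInitBody (values : List Int) (st : List (List Int) × List (List Int)) (i : Int) :
    List (List Int) × List (List Int) :=
  (pvSet2 st.1 i i (PySem.List.pyGetD values i 0),
   pvSet2 st.2 i i (PySem.List.pyGetD values i 0))

-- body of the inner "for j in range(i+1, n)" loop (sum[i][j] is written first, then read back)
def pvInnerBody (values : List Int) (i : Int) (st : List (List Int) × List (List Int)) (j : Int) :
    List (List Int) × List (List Int) :=
  let s' := pvSet2 st.2 i j (pvGet2 st.2 (i + 1) j + PySem.List.pyGetD values i 0)
  (pvSet2 st.1 i j (pvGet2 s' i j - min (pvGet2 st.1 (i + 1) j) (pvGet2 st.1 i (j - 1))), s')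

-- body of the outer "for i in range(n-2, -1, -1)" loop
def pvOuterBody (values : List Int) (n : Int) (st : List (List Int) × List (List Int)) (i : Int) :
    List (List Int) × List (List Int) :=
  (PySem.List.pyRange (i + 1) n 1).foldl (pvInnerBody values i) st

def firstWillWin (values : List Int) : Bool :=
  if values = [] then false
  else
    let n : Int := (values.length : Int)
    let dp0 : List (List Int) :=
      (PySem.List.pyRange 0 n 1).map (fun _ => List.replicate values.length (0 : Int))
    let sum0 : List (List Int) :=
      (PySem.List.pyRange 0 n 1).map (fun _ => List.replicate values.length (0 : Int))
    let st1 := (PySem.List.pyRange 0 n 1).foldl (pvInitBody values) (dp0, sum0)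
    let st2 := (PySem.List.pyRange (n - 2) (-1) (-1)).foldl (pvOuterBody values n) st1
    decide (pvGet2 st2.1 0 (n - 1) > pvGet2 st2.2 0 (n - 1) - pvGet2 st2.1 0 (n - 1))

-- ===== PORT B =====
-- B-side helpers. The loop state is (stack, memo); the Lean stack list is the REVERSE of the
-- Python list (head = Python's stack[-1], so Python's append/extend at the end is cons/prepend here).
-- One iteration of B's "while stack:" loop:
def pvStep (values : List Int)
    (st : List (Int × Int) × PySem.Dict (Int × Int) Int) :
    List (Int × Int) × PySem.Dict (Int × Int) Int :=
  match st with
  | ([], m) => ([], m)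
  | ((i, j) :: rest, m) =>
    if i = j then (rest, m.insert (i, j) (PySem.List.pyGetD values i 0))
    else
      let need : List (Int × Int) :=
        (if (m.get? (i + 1, j)).isNone then [(i + 1, j)] else []) ++
        (if (m.get? (i, j - 1)).isNone then [(i, j - 1)] else [])
      if need ≠ [] then (need.reverse ++ (i, j) :: rest, m)
      else
        (rest, m.insert (i, j)
          (max (PySem.List.pyGetD values i 0 - m.getD (i + 1, j) 0)
               (PySem.List.pyGetD values j 0 - m.getD (i, j - 1) 0)))

-- "while stack:" run; the fuel argument only makes the loop total in Lean (the proof below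
-- shows 3 * 2 ^ n iterations always suffice, so the fueled run computes the Python loop's result).
def pvRun (values : List Int) :
    Nat → List (Int × Int) × PySem.Dict (Int × Int) Int →
    List (Int × Int) × PySem.Dict (Int × Int) Int
  | 0, st => st
  | f + 1, st => pvRun values f (pvStep values st)

def firstWillWin_alt (values : List Int) : Bool :=
  if values = [] then false
  else
    let n : Int := (values.length : Int)
    let fin := pvRun values (3 * 2 ^ values.length) ([(0, n - 1)], PySem.Dict.empty)
    decide (fin.2.getD (0, n - 1) 0 > 0)

-- ===== PRECONDITION & SPEC =====
def Spec_firstWillWin (values : List Int) (out : Bool) : Prop := out = firstWillWin_alt values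
instance (values : List Int) (out : Bool) : Decidable (Spec_firstWillWin values out) := by
  unfold Spec_firstWillWin; infer_instance

-- ===== CLAIM (what is proved, stated in full; the proofs are below) =====
def Claim_equal_firstWillWin : Prop :=
  ∀ (values : List Int), Dom_firstWillWin values → Spec_firstWillWin values (firstWillWin values)

-- ===== LEMMAS AND PROOFS =====

-- values[i] as a total Nat-indexed read
def vI (values : List Int) (i : Nat) : Int := values.getD i 0
-- sum of values[i..i+d]
def sF (values : List Int) (i d : Nat) : Int := ((values.drop i).take (d + 1)).sum
-- A's dp[i][i+d]: best absolute score of the player to move on values[i..i+d]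
def dF (values : List Int) : Nat → Nat → Int
  | 0, i => vI values i
  | d + 1, i => sF values i (d + 1) - min (dF values d (i + 1)) (dF values d i)
-- B's memo[(i, i+d)]: net advantage of the player to move on values[i..i+d]
def gF (values : List Int) : Nat → Nat → Int
  | 0, i => vI values i
  | d + 1, i => max (vI values i - gF values d (i + 1)) (vI values (i + d + 1) - gF values d i)

theorem sum_take_succ (xs : List Int) (k : Nat) :
    (xs.take (k + 1)).sum = (xs.take k).sum + xs.getD k 0 := by
  rw [List.take_add_one]
  cases h : xs[k]? <;> simp [List.getD, h]

theorem getD_drop (xs : List Int) (i k : Nat) : (xs.drop i).getD k 0 = xs.getD (i + k) 0 := by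
  simp [List.getD, List.getElem?_drop]

theorem sF_zero (values : List Int) (i : Nat) : sF values i 0 = vI values i := by
  have := sum_take_succ (values.drop i) 0
  simpa [sF, vI, getD_drop] using this

theorem sF_cons (values : List Int) (i d : Nat) :
    sF values i (d + 1) = vI values i + sF values (i + 1) d := by
  rcases Nat.lt_or_ge i values.length with h | h
  · rw [sF, sF, ← List.getElem_cons_drop (as := values) (i := i)]
    simp [vI, List.getD, List.getElem?_eq_getElem h]
    exact h
  · rw [sF, sF, List.drop_eq_nil_of_le h, List.drop_eq_nil_of_le (by omega)]
    simp [vI, List.getD]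
    rw [List.getElem?_eq_none (by omega)]
    rfl

theorem sF_snoc (values : List Int) (i d : Nat) :
    sF values i (d + 1) = sF values i d + vI values (i + d + 1) := by
  have := sum_take_succ (values.drop i) (d + 1)
  rw [sF, sF, this, getD_drop]
  simp [vI, Nat.add_assoc]

theorem gF_eq (values : List Int) (d i : Nat) :
    gF values d i = 2 * dF values d i - sF values i d := by
  induction d generalizing i with
  | zero => rw [gF, dF, sF_zero]; ring
  | succ d ih =>
    rw [gF, dF]
    have h1 := ih (i + 1)
    have h2 := ih i
    have h3 := sF_cons values i d
    have h4 := sF_snoc values i d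
    omega

-- ---------- characterisation of port A ----------

def mG (m : List (List Int)) (i j : Nat) : Int := (m.getD i []).getD j 0

def dims (nn : Nat) (m : List (List Int)) : Prop :=
  m.length = nn ∧ ∀ i, i < nn → (m.getD i []).length = nn

def dpM (values : List Int) (i j : Nat) : Int := if j < i then 0 else dF values (j - i) i
def sM (values : List Int) (i j : Nat) : Int := if j < i then 0 else sF values i (j - i)

-- invariant between outer iterations: rows ≥ i0 fully computed, rows < i0 diagonal only
def AInv (values : List Int) (i0 : Nat) (st : List (List Int) × List (List Int)) : Prop :=
  dims values.length st.1 ∧ dims values.length st.2 ∧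
  ∀ i j, i < values.length → j < values.length →
    (mG st.1 i j = if i0 ≤ i ∨ i = j then dpM values i j else 0) ∧
    (mG st.2 i j = if i0 ≤ i ∨ i = j then sM values i j else 0)

-- invariant inside the inner loop: row i0 computed for columns < jc
def ARow (values : List Int) (i0 jc : Nat) (st : List (List Int) × List (List Int)) : Prop :=
  dims values.length st.1 ∧ dims values.length st.2 ∧
  ∀ i j, i < values.length → j < values.length →
    (mG st.1 i j = if i0 < i ∨ (i = i0 ∧ j < jc) ∨ i = j then dpM values i j else 0) ∧
    (mG st.2 i j = if i0 < i ∨ (i = i0 ∧ j < jc) ∨ i = j then sM values i j else 0)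

theorem mG_pvGet2 (m : List (List Int)) (i j : Nat) : pvGet2 m (i : Int) (j : Int) = mG m i j := by
  simp [pvGet2, mG, PySem.List.pyGetD_natCast]

theorem getD_set_outer (m : List (List Int)) (a i : Nat) (r : List Int) (ha : a < m.length) :
    (m.set a r).getD i [] = if i = a then r else m.getD i [] := by
  by_cases hia : i = a
  · subst hia
    simp [List.getD, ha]
  · simp [List.getD, List.getElem?_set_ne (fun e => hia e.symm), hia]

theorem getD_set_row (r : List Int) (b j : Nat) (x : Int) (hb : b < r.length) :
    (r.set b x).getD j 0 = if j = b then x else r.getD j 0 := by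
  by_cases hjb : j = b
  · subst hjb
    simp [List.getD, hb]
  · simp [List.getD, List.getElem?_set_ne (fun e => hjb e.symm), hjb]

theorem pvSet2_natCast (m : List (List Int)) (a b : Nat) (x : Int) :
    pvSet2 m (a : Int) (b : Int) x = m.set a ((m.getD a []).set b x) := by
  rw [pvSet2, PySem.List.pyGetD_natCast, PySem.List.pySetD_natCast, PySem.List.pySetD_natCast]

theorem dims_pvSet2 (m : List (List Int)) (nn a b : Nat) (x : Int)
    (hd : dims nn m) (ha : a < nn) (_hb : b < nn) : dims nn (pvSet2 m (a : Int) (b : Int) x) := by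
  obtain ⟨hlen, hrow⟩ := hd
  rw [pvSet2_natCast]
  refine ⟨by simp [hlen], ?_⟩
  intro i hi
  rw [getD_set_outer m a i _ (by omega)]
  by_cases hia : i = a
  · rw [if_pos hia, List.length_set]
    exact hrow a ha
  · rw [if_neg hia]
    exact hrow i hi

theorem mG_pvSet2 (m : List (List Int)) (nn a b i j : Nat) (x : Int)
    (hd : dims nn m) (ha : a < nn) (hb : b < nn) :
    mG (pvSet2 m (a : Int) (b : Int) x) i j = if i = a ∧ j = b then x else mG m i j := by
  obtain ⟨hlen, hrow⟩ := hd
  rw [pvSet2_natCast, mG, getD_set_outer m a i _ (by omega)]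
  by_cases hia : i = a
  · rw [if_pos hia]
    rw [getD_set_row _ b j x (by rw [hrow a ha]; exact hb)]
    by_cases hjb : j = b
    · rw [if_pos hjb, if_pos ⟨hia, hjb⟩]
    · rw [if_neg hjb, if_neg (fun hc => hjb hc.2), mG, hia]
  · rw [if_neg hia, if_neg (fun hc => hia hc.1), mG]

theorem inner_step (values : List Int) (i0 jc : Nat) (st : List (List Int) × List (List Int))
    (h0 : i0 < jc) (h1 : jc < values.length) (h : ARow values i0 jc st) :
    ARow values i0 (jc + 1) (pvInnerBody values (i0 : Int) st (jc : Int)) := by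
  obtain ⟨hd1, hd2, hP⟩ := h
  have hi0n : i0 < values.length := by omega
  have hi1n : i0 + 1 < values.length := by omega
  have c1 : ((i0 : Int) + 1) = ((i0 + 1 : Nat) : Int) := by push_cast; ring
  have c2 : ((jc : Int) - 1) = ((jc - 1 : Nat) : Int) := by omega
  simp only [pvInnerBody]
  rw [c1, c2]
  -- the value written into sum[i][j]
  have hV : pvGet2 st.2 (((i0 + 1 : Nat) : Int)) ((jc : Nat) : Int) + PySem.List.pyGetD values ((i0 : Nat) : Int) 0 = sM values i0 jc := by
    rw [mG_pvGet2, PySem.List.pyGetD_natCast]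
    rw [(hP (i0 + 1) jc hi1n h1).2, if_pos (Or.inl (by omega))]
    rw [sM, if_neg (by omega), sM, if_neg (by omega)]
    have e : jc - i0 = (jc - i0 - 1) + 1 := by omega
    have e2 : jc - (i0 + 1) = jc - i0 - 1 := by omega
    rw [e, e2, sF_cons]
    unfold vI
    ring
  rw [hV]
  have hds : dims values.length (pvSet2 st.2 (i0 : Int) (jc : Int) (sM values i0 jc)) :=
    dims_pvSet2 st.2 values.length i0 jc _ hd2 hi0n h1
  have hmS : ∀ i j : Nat,
      mG (pvSet2 st.2 (i0 : Int) (jc : Int) (sM values i0 jc)) i j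
        = if i = i0 ∧ j = jc then sM values i0 jc else mG st.2 i j := by
    intro i j
    exact mG_pvSet2 st.2 values.length i0 jc i j _ hd2 hi0n h1
  -- the value written into dp[i][j]
  have hread : pvGet2 (pvSet2 st.2 ((i0 : Nat) : Int) ((jc : Nat) : Int) (sM values i0 jc)) ((i0 : Nat) : Int) ((jc : Nat) : Int) = sM values i0 jc := by
    rw [mG_pvGet2, hmS i0 jc, if_pos ⟨rfl, rfl⟩]
  rw [hread]
  have hW : sM values i0 jc - min (pvGet2 st.1 (((i0 + 1 : Nat) : Int)) ((jc : Nat) : Int)) (pvGet2 st.1 ((i0 : Nat) : Int) (((jc - 1 : Nat) : Int))) = dpM values i0 jc := by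
    rw [mG_pvGet2, mG_pvGet2]
    rw [(hP (i0 + 1) jc hi1n h1).1, if_pos (Or.inl (by omega))]
    rw [(hP i0 (jc - 1) hi0n (by omega)).1, if_pos (Or.inr (Or.inl ⟨rfl, by omega⟩))]
    rw [sM, if_neg (by omega), dpM, if_neg (by omega), dpM, if_neg (by omega), dpM, if_neg (by omega)]
    have e : jc - i0 = (jc - i0 - 1) + 1 := by omega
    have e2 : jc - (i0 + 1) = jc - i0 - 1 := by omega
    have e3 : jc - 1 - i0 = jc - i0 - 1 := by omega
    rw [e, e2, e3, dF, e.symm]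
  rw [hW]
  show ARow values i0 (jc + 1)
    (pvSet2 st.1 ((i0 : Nat) : Int) ((jc : Nat) : Int) (dpM values i0 jc),
     pvSet2 st.2 ((i0 : Nat) : Int) ((jc : Nat) : Int) (sM values i0 jc))
  refine ⟨dims_pvSet2 st.1 values.length i0 jc _ hd1 hi0n h1, hds, ?_⟩
  intro i j hi hj
  constructor
  · rw [mG_pvSet2 st.1 values.length i0 jc i j _ hd1 hi0n h1]
    by_cases hc : i = i0 ∧ j = jc
    · obtain ⟨e1, e2⟩ := hc
      subst e1; subst e2
      rw [if_pos ⟨rfl, rfl⟩, if_pos (Or.inr (Or.inl ⟨rfl, by omega⟩))]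
    · rw [if_neg hc, (hP i j hi hj).1]
      by_cases hA : i0 < i ∨ (i = i0 ∧ j < jc) ∨ i = j
      · rw [if_pos hA, if_pos (by rcases hA with h | h | h; exacts [Or.inl h, Or.inr (Or.inl ⟨h.1, by omega⟩), Or.inr (Or.inr h)])]
      · rw [if_neg hA, if_neg ?_]
        rintro (h | ⟨e1, h⟩ | h)
        · exact hA (Or.inl h)
        · rcases Nat.lt_or_ge j jc with hlt | hge
          · exact hA (Or.inr (Or.inl ⟨e1, hlt⟩))
          · exact hc ⟨e1, by omega⟩
        · exact hA (Or.inr (Or.inr h))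
  · rw [hmS i j]
    by_cases hc : i = i0 ∧ j = jc
    · obtain ⟨e1, e2⟩ := hc
      subst e1; subst e2
      rw [if_pos ⟨rfl, rfl⟩, if_pos (Or.inr (Or.inl ⟨rfl, by omega⟩))]
    · rw [if_neg hc, (hP i j hi hj).2]
      by_cases hA : i0 < i ∨ (i = i0 ∧ j < jc) ∨ i = j
      · rw [if_pos hA, if_pos (by rcases hA with h | h | h; exacts [Or.inl h, Or.inr (Or.inl ⟨h.1, by omega⟩), Or.inr (Or.inr h)])]
      · rw [if_neg hA, if_neg ?_]
        rintro (h | ⟨e1, h⟩ | h)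
        · exact hA (Or.inl h)
        · rcases Nat.lt_or_ge j jc with hlt | hge
          · exact hA (Or.inr (Or.inl ⟨e1, hlt⟩))
          · exact hc ⟨e1, by omega⟩
        · exact hA (Or.inr (Or.inr h))

theorem inner_go (values : List Int) (i0 : Nat) :
    ∀ (c jc : Nat) (st : List (List Int) × List (List Int)), jc + c = values.length → i0 < jc →
    ARow values i0 jc st →
    ARow values i0 values.length
      ((PySem.List.pyRange (jc : Int) (values.length : Int) 1).foldl (pvInnerBody values (i0 : Int)) st) := by
  intro c
  induction c with
  | zero =>
    intro jc st hc _ h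
    rw [PySem.List.pyRange_one_eq_nil (by omega), List.foldl_nil]
    have : jc = values.length := by omega
    subst this
    exact h
  | succ c ih =>
    intro jc st hc hlt h
    rw [PySem.List.pyRange_one_cons (by exact_mod_cast (by omega : (jc : Int) < (values.length : Int))), List.foldl_cons]
    have e : ((jc : Int) + 1) = ((jc + 1 : Nat) : Int) := by push_cast; ring
    rw [e]
    exact ih (jc + 1) _ (by omega) (by omega) (inner_step values i0 jc st hlt (by omega) h)

theorem ARow_of_AInv (values : List Int) (i0 : Nat) (st : List (List Int) × List (List Int))
    (h : AInv values (i0 + 1) st) : ARow values i0 (i0 + 1) st := by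
  obtain ⟨hd1, hd2, hP⟩ := h
  refine ⟨hd1, hd2, ?_⟩
  intro i j hi hj
  constructor
  · rw [(hP i j hi hj).1]
    split_ifs with h1 h2
    · rfl
    · exfalso; omega
    · rw [dpM, if_pos (by omega)]
    · rfl
  · rw [(hP i j hi hj).2]
    split_ifs with h1 h2
    · rfl
    · exfalso; omega
    · rw [sM, if_pos (by omega)]
    · rfl

theorem AInv_of_ARow (values : List Int) (i0 : Nat) (st : List (List Int) × List (List Int))
    (h : ARow values i0 values.length st) : AInv values i0 st := by
  obtain ⟨hd1, hd2, hP⟩ := h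
  refine ⟨hd1, hd2, ?_⟩
  intro i j hi hj
  constructor
  · rw [(hP i j hi hj).1]
    split_ifs with h1 h2 <;> first | rfl | (exfalso; omega)
  · rw [(hP i j hi hj).2]
    split_ifs with h1 h2 <;> first | rfl | (exfalso; omega)

theorem outer_step (values : List Int) (k : Nat) (st : List (List Int) × List (List Int))
    (hk : k + 2 ≤ values.length) (h : AInv values (k + 1) st) :
    AInv values k (pvOuterBody values (values.length : Int) st (k : Int)) := by
  rw [pvOuterBody]
  have e : ((k : Int) + 1) = ((k + 1 : Nat) : Int) := by push_cast; ring
  rw [e]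
  exact AInv_of_ARow values k _
    (inner_go values k (values.length - (k + 1)) (k + 1) st (by omega) (by omega)
      (ARow_of_AInv values k st h))

theorem outer_go (values : List Int) :
    ∀ (k : Nat) (st : List (List Int) × List (List Int)), k + 2 ≤ values.length →
    AInv values (k + 1) st →
    AInv values 0 ((PySem.List.pyRange (k : Int) (-1) (-1)).foldl (pvOuterBody values (values.length : Int)) st) := by
  intro k
  induction k with
  | zero =>
    intro st hk h
    rw [PySem.List.pyRange_neg_one_cons (by norm_num), List.foldl_cons]
    have e : ((0 : Nat) : Int) - 1 = -1 := by norm_num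
    rw [e, PySem.List.pyRange_neg_one_eq_nil le_rfl, List.foldl_nil]
    exact outer_step values 0 st hk h
  | succ k ih =>
    intro st hk h
    rw [PySem.List.pyRange_neg_one_cons (by exact_mod_cast (by omega : (-1 : Int) < ((k + 1 : Nat) : Int))), List.foldl_cons]
    have e : (((k + 1 : Nat) : Int)) - 1 = ((k : Nat) : Int) := by push_cast; ring
    rw [e]
    exact ih _ (by omega) (outer_step values (k + 1) st (by omega) h)

def InitInv (values : List Int) (k : Nat) (st : List (List Int) × List (List Int)) : Prop :=
  dims values.length st.1 ∧ dims values.length st.2 ∧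
  ∀ i j, i < values.length → j < values.length →
    (mG st.1 i j = if i = j ∧ i < k then vI values i else 0) ∧
    (mG st.2 i j = if i = j ∧ i < k then vI values i else 0)

theorem zero_mat_eq (values : List Int) :
    (PySem.List.pyRange 0 (values.length : Int) 1).map (fun _ => List.replicate values.length (0 : Int))
      = List.replicate values.length (List.replicate values.length (0 : Int)) := by
  rw [List.map_const']
  congr 1
  rw [PySem.List.length_pyRange_one]
  omega

theorem dims_zero_mat (values : List Int) :
    dims values.length (List.replicate values.length (List.replicate values.length (0 : Int))) := by
  refine ⟨by simp, ?_⟩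
  intro i hi
  rw [List.getD, List.getElem?_replicate, if_pos hi]
  simp

theorem mG_zero_mat (values : List Int) (i j : Nat) :
    mG (List.replicate values.length (List.replicate values.length (0 : Int))) i j = 0 := by
  by_cases hi : i < values.length <;> by_cases hj : j < values.length <;>
    simp [mG, List.getD, hi, hj]

theorem init_step (values : List Int) (k : Nat) (st : List (List Int) × List (List Int))
    (hk : k < values.length) (h : InitInv values k st) :
    InitInv values (k + 1) (pvInitBody values st (k : Int)) := by
  obtain ⟨hd1, hd2, hP⟩ := h
  rw [pvInitBody, PySem.List.pyGetD_natCast]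
  refine ⟨dims_pvSet2 st.1 values.length k k _ hd1 hk hk,
          dims_pvSet2 st.2 values.length k k _ hd2 hk hk, ?_⟩
  intro i j hi hj
  constructor
  · rw [mG_pvSet2 st.1 values.length k k i j _ hd1 hk hk]
    by_cases hc : i = k ∧ j = k
    · obtain ⟨e1, e2⟩ := hc
      subst e1; subst e2
      rw [if_pos ⟨rfl, rfl⟩, if_pos ⟨rfl, by omega⟩]
      rfl
    · rw [if_neg hc, (hP i j hi hj).1]
      split_ifs with h1 h2 <;> first | rfl | (exfalso; omega)
  · rw [mG_pvSet2 st.2 values.length k k i j _ hd2 hk hk]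
    by_cases hc : i = k ∧ j = k
    · obtain ⟨e1, e2⟩ := hc
      subst e1; subst e2
      rw [if_pos ⟨rfl, rfl⟩, if_pos ⟨rfl, by omega⟩]
      rfl
    · rw [if_neg hc, (hP i j hi hj).2]
      split_ifs with h1 h2 <;> first | rfl | (exfalso; omega)

theorem init_loop (values : List Int) :
    ∀ (c k : Nat) (st : List (List Int) × List (List Int)), k + c = values.length →
    InitInv values k st →
    InitInv values values.length
      ((PySem.List.pyRange (k : Int) (values.length : Int) 1).foldl (pvInitBody values) st) := by
  intro c
  induction c with
  | zero =>
    intro k st hc h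
    rw [PySem.List.pyRange_one_eq_nil (by omega), List.foldl_nil]
    have : k = values.length := by omega
    subst this
    exact h
  | succ c ih =>
    intro k st hc h
    rw [PySem.List.pyRange_one_cons (by exact_mod_cast (by omega : (k : Int) < (values.length : Int))), List.foldl_cons]
    have e : ((k : Int) + 1) = ((k + 1 : Nat) : Int) := by push_cast; ring
    rw [e]
    exact ih (k + 1) _ (by omega) (init_step values k st (by omega) h)

theorem AInv_of_InitInv (values : List Int) (st : List (List Int) × List (List Int))
    (h : InitInv values values.length st) : AInv values (values.length - 1) st := by
  obtain ⟨hd1, hd2, hP⟩ := h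
  refine ⟨hd1, hd2, ?_⟩
  intro i j hi hj
  constructor
  · rw [(hP i j hi hj).1]
    by_cases h1 : i = j ∧ i < values.length
    · obtain ⟨e, _⟩ := h1
      subst e
      rw [if_pos ⟨rfl, hi⟩, if_pos (Or.inr rfl), dpM, if_neg (by omega)]
      have : i - i = 0 := by omega
      rw [this, dF]
    · rw [if_neg h1]
      have hne : i ≠ j := fun e => h1 ⟨e, hi⟩
      by_cases h2 : values.length - 1 ≤ i ∨ i = j
      · rw [if_pos h2, dpM, if_pos (by omega)]
      · rw [if_neg h2]
  · rw [(hP i j hi hj).2]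
    by_cases h1 : i = j ∧ i < values.length
    · obtain ⟨e, _⟩ := h1
      subst e
      rw [if_pos ⟨rfl, hi⟩, if_pos (Or.inr rfl), sM, if_neg (by omega)]
      have : i - i = 0 := by omega
      rw [this, sF_zero]
    · rw [if_neg h1]
      have hne : i ≠ j := fun e => h1 ⟨e, hi⟩
      by_cases h2 : values.length - 1 ≤ i ∨ i = j
      · rw [if_pos h2, sM, if_pos (by omega)]
      · rw [if_neg h2]

theorem init_go (values : List Int) :
    AInv values (values.length - 1)
      ((PySem.List.pyRange 0 (values.length : Int) 1).foldl (pvInitBody values)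
        ((PySem.List.pyRange 0 (values.length : Int) 1).map (fun _ => List.replicate values.length (0 : Int)),
         (PySem.List.pyRange 0 (values.length : Int) 1).map (fun _ => List.replicate values.length (0 : Int)))) := by
  apply AInv_of_InitInv
  rw [zero_mat_eq]
  have h0 : InitInv values 0
      (List.replicate values.length (List.replicate values.length (0 : Int)),
       List.replicate values.length (List.replicate values.length (0 : Int))) := by
    refine ⟨dims_zero_mat values, dims_zero_mat values, ?_⟩
    intro i j hi hj
    constructor <;> (rw [mG_zero_mat]; rw [if_neg (by omega)])
  exact init_loop values values.length 0 _ (by omega) h0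

theorem a_eq (values : List Int) (h : values ≠ []) :
    firstWillWin values =
      decide (dF values (values.length - 1) 0 >
              sF values 0 (values.length - 1) - dF values (values.length - 1) 0) := by
  have hn : 1 ≤ values.length := by
    cases values with
    | nil => exact absurd rfl h
    | cons a t => simp
  have key : ∀ st : List (List Int) × List (List Int), AInv values 0 st →
      decide (pvGet2 st.1 0 ((values.length : Int) - 1) >
              pvGet2 st.2 0 ((values.length : Int) - 1) - pvGet2 st.1 0 ((values.length : Int) - 1))
        = decide (dF values (values.length - 1) 0 >
                  sF values 0 (values.length - 1) - dF values (values.length - 1) 0) := by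
    intro st hst
    obtain ⟨_, _, hP⟩ := hst
    have e1 : ((values.length : Int) - 1) = ((values.length - 1 : Nat) : Int) := by omega
    have g1 : pvGet2 st.1 0 ((values.length : Int) - 1) = mG st.1 0 (values.length - 1) := by
      rw [e1]; exact mG_pvGet2 st.1 0 (values.length - 1)
    have g2 : pvGet2 st.2 0 ((values.length : Int) - 1) = mG st.2 0 (values.length - 1) := by
      rw [e1]; exact mG_pvGet2 st.2 0 (values.length - 1)
    rw [g1, g2, (hP 0 (values.length - 1) (by omega) (by omega)).1,
        (hP 0 (values.length - 1) (by omega) (by omega)).2,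
        if_pos (Or.inl (by omega)), if_pos (Or.inl (by omega)),
        dpM, if_neg (by omega), sM, if_neg (by omega)]
    rw [Nat.sub_zero]
  simp only [firstWillWin, if_neg h]
  by_cases h2 : 2 ≤ values.length
  · have e : ((values.length : Int) - 2) = ((values.length - 2 : Nat) : Int) := by omega
    rw [e]
    refine key _ ?_
    apply outer_go values (values.length - 2) _ (by omega)
    have e2 : values.length - 2 + 1 = values.length - 1 := by omega
    rw [e2]
    exact init_go values
  · have e : ((values.length : Int) - 2) = -1 := by omega
    rw [e, PySem.List.pyRange_neg_one_eq_nil le_rfl, List.foldl_nil]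
    refine key _ ?_
    have h0 := init_go values
    have e2 : values.length - 1 = 0 := by omega
    rw [e2] at h0
    exact h0

-- ---------- characterisation of port B ----------

-- the memo key for the interval values[a..b]
def keyP (a b : Nat) : Int × Int := ((a : Int), (b : Int))

theorem keyP_inj (a b c d : Nat) : keyP a b = keyP c d ↔ a = c ∧ b = d := by
  simp [keyP, Prod.ext_iff]

-- every memoised entry is a valid interval carrying its gF value
def memoOK (values : List Int) (m : PySem.Dict (Int × Int) Int) : Prop :=
  ∀ a b : Nat, ∀ v : Int, m.get? (keyP a b) = some v →
    a ≤ b ∧ b < values.length ∧ v = gF values (b - a) a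

theorem memoOK_empty (values : List Int) : memoOK values PySem.Dict.empty := by
  intro a b v h
  rw [PySem.Dict.get?_empty] at h
  cases h

theorem memoOK_insert (values : List Int) (m : PySem.Dict (Int × Int) Int)
    (h : memoOK values m) (a b : Nat) (hab : a ≤ b) (hb : b < values.length) :
    memoOK values (m.insert (keyP a b) (gF values (b - a) a)) := by
  intro c e v hget
  rw [PySem.Dict.get?_insert] at hget
  by_cases hk : keyP c e = keyP a b
  · rw [if_pos hk] at hget
    obtain ⟨rfl, rfl⟩ := (keyP_inj c e a b).1 hk
    exact ⟨hab, hb, (Option.some_inj.mp hget).symm⟩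
  · rw [if_neg hk] at hget
    exact h c e v hget

theorem isSome_insert (m : PySem.Dict (Int × Int) Int) (k : Int × Int) (v : Int) (p : Int × Int)
    (h : (m.get? p).isSome) : ((m.insert k v).get? p).isSome := by
  rw [PySem.Dict.get?_insert]
  by_cases hk : p = k
  · rw [if_pos hk]; rfl
  · rw [if_neg hk]; exact h

theorem pvRun_zero (values : List Int) (st : List (Int × Int) × PySem.Dict (Int × Int) Int) :
    pvRun values 0 st = st := rfl

theorem pvRun_add (values : List Int) (k1 k2 : Nat)
    (st : List (Int × Int) × PySem.Dict (Int × Int) Int) :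
    pvRun values (k1 + k2) st = pvRun values k2 (pvRun values k1 st) := by
  induction k1 generalizing st with
  | zero => rw [Nat.zero_add]; rfl
  | succ k1 ih =>
    have e : k1 + 1 + k2 = (k1 + k2) + 1 := by omega
    rw [e]
    show pvRun values (k1 + k2) (pvStep values st) = _
    rw [ih (pvStep values st)]
    rfl

theorem pvRun_nil (values : List Int) (f : Nat) (m : PySem.Dict (Int × Int) Int) :
    pvRun values f ([], m) = ([], m) := by
  induction f with
  | zero => rfl
  | succ f ih => show pvRun values f (pvStep values ([], m)) = _; rw [show pvStep values ([], m) = ([], m) from rfl, ih]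

-- fuel bound for one interval of length d+1
def Tfun : Nat → Nat
  | 0 => 1
  | d + 1 => 2 * Tfun d + 2

theorem Tfun_le (d : Nat) : Tfun d + 2 ≤ 3 * 2 ^ d := by
  induction d with
  | zero => simp [Tfun]
  | succ d ih =>
    rw [Tfun, pow_succ]
    omega

-- value pinned by memoOK at a present key
theorem memo_pin (values : List Int) (m : PySem.Dict (Int × Int) Int)
    (hok : memoOK values m) (a b : Nat) (hs : (m.get? (keyP a b)).isSome) :
    m.get? (keyP a b) = some (gF values (b - a) a) := by
  obtain ⟨v, hv⟩ := Option.isSome_iff_exists.1 hs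
  rw [hv, (hok a b v hv).2.2]

-- the central invariant: with the valid interval (a, a+d) on top of the stack and a correct memo,
-- some k ≤ Tfun d steps pop exactly that entry, leaving a correct memo that contains its value
theorem stack_go (values : List Int) :
    ∀ (d a : Nat) (S : List (Int × Int)) (m : PySem.Dict (Int × Int) Int),
      a + d < values.length → memoOK values m →
      ∃ (k : Nat) (m' : PySem.Dict (Int × Int) Int),
        k ≤ Tfun d ∧
        pvRun values k (keyP a (a + d) :: S, m) = (S, m') ∧
        memoOK values m' ∧
        m'.get? (keyP a (a + d)) = some (gF values d a) ∧
        (∀ p, (m.get? p).isSome → (m'.get? p).isSome) := by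
  intro d
  induction d with
  | zero =>
    intro a S m hn hm
    simp only [Nat.add_zero] at hn ⊢
    refine ⟨1, m.insert (keyP a a) (gF values 0 a), le_rfl, ?_, ?_, ?_, ?_⟩
    · show pvRun values 0 (pvStep values (((a : Int), (a : Int)) :: S, m)) = _
      simp only [pvStep]
      rw [if_pos trivial, PySem.List.pyGetD_natCast]
      rfl
    · have := memoOK_insert values m hm a a le_rfl hn
      simpa using this
    · rw [PySem.Dict.get?_insert, if_pos rfl]
    · intro p hp
      exact isSome_insert m _ _ p hp
  | succ d ih =>
    intro a S m hn hm
    have hij : ((a : Nat) : Int) ≠ ((a + (d + 1) : Nat) : Int) := by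
      intro e
      have := Nat.cast_inj (R := Int) |>.1 e
      omega
    have eA : (((a : Nat) : Int) + 1, ((a + (d + 1) : Nat) : Int)) = keyP (a + 1) (a + d + 1) := by
      simp only [keyP, Prod.ext_iff]
      constructor <;> push_cast <;> omega
    have eB : (((a : Nat) : Int), ((a + (d + 1) : Nat) : Int) - 1) = keyP a (a + d) := by
      simp only [keyP, Prod.ext_iff]
      constructor <;> push_cast <;> omega
    -- the final combining step, valid once both children are memoised
    have final_step : ∀ (mm : PySem.Dict (Int × Int) Int) (SS : List (Int × Int)),
        memoOK values mm →
        (mm.get? (keyP (a + 1) (a + d + 1))).isSome →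
        (mm.get? (keyP a (a + d))).isSome →
        pvStep values (keyP a (a + (d + 1)) :: SS, mm)
          = (SS, mm.insert (keyP a (a + (d + 1))) (gF values (d + 1) a)) := by
      intro mm SS hok hAs hBs
      have hA : mm.get? (keyP (a + 1) (a + d + 1)) = some (gF values d (a + 1)) := by
        have := memo_pin values mm hok (a + 1) (a + d + 1) hAs
        rwa [show a + d + 1 - (a + 1) = d by omega] at this
      have hB : mm.get? (keyP a (a + d)) = some (gF values d a) := by
        have := memo_pin values mm hok a (a + d) hBs
        rwa [show a + d - a = d by omega] at this
      show pvStep values ((((a : Nat) : Int), ((a + (d + 1) : Nat) : Int)) :: SS, mm) = _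
      simp only [pvStep, if_neg hij, eA, eB, hA, hB]
      simp only [Option.isNone_some, Bool.false_eq_true, if_false, List.append_nil, ne_eq,
        not_true_eq_false]
      congr 2
      rw [PySem.Dict.getD_eq_get?_getD, PySem.Dict.getD_eq_get?_getD, hA, hB,
        Option.getD_some, Option.getD_some,
        PySem.List.pyGetD_natCast, PySem.List.pyGetD_natCast, gF]
      rfl
    have hmemoFin : ∀ mm : PySem.Dict (Int × Int) Int, memoOK values mm →
        memoOK values (mm.insert (keyP a (a + (d + 1))) (gF values (d + 1) a)) := by
      intro mm hok
      have := memoOK_insert values mm hok a (a + (d + 1)) (by omega) (by omega)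
      rwa [show a + (d + 1) - a = d + 1 by omega] at this
    -- case analysis on which children are already memoised
    cases hA0 : m.get? (keyP (a + 1) (a + d + 1)) with
    | some vA =>
      cases hB0 : m.get? (keyP a (a + d)) with
      | some vB =>
        -- both present: one combining step
        refine ⟨1, m.insert (keyP a (a + (d + 1))) (gF values (d + 1) a), by rw [Tfun]; omega, ?_,
          hmemoFin m hm, by rw [PySem.Dict.get?_insert, if_pos rfl], ?_⟩
        · show pvRun values 0 (pvStep values (keyP a (a + (d + 1)) :: S, m)) = _
          rw [final_step m S hm (by rw [hA0]; rfl) (by rw [hB0]; rfl)]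
          rfl
        · intro p hp
          exact isSome_insert m _ _ p hp
      | none =>
        -- only (a, a+d) missing: push it, solve it, then combine
        have hpush : pvStep values (keyP a (a + (d + 1)) :: S, m)
            = (keyP a (a + d) :: keyP a (a + (d + 1)) :: S, m) := by
          show pvStep values ((((a : Nat) : Int), ((a + (d + 1) : Nat) : Int)) :: S, m) = _
          simp only [pvStep, if_neg hij, eA, eB, hA0, hB0]
          simp only [Option.isNone_some, Option.isNone_none, Bool.false_eq_true, if_false,
            if_true, List.nil_append]
          rw [if_pos (by simp)]
          rfl
        obtain ⟨k1, m1, hk1, hrun1, hok1, hget1, hpre1⟩ :=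
          ih a (keyP a (a + (d + 1)) :: S) m (by omega) hm
        refine ⟨1 + k1 + 1, m1.insert (keyP a (a + (d + 1))) (gF values (d + 1) a),
          by rw [Tfun]; omega, ?_, hmemoFin m1 hok1, by rw [PySem.Dict.get?_insert, if_pos rfl], ?_⟩
        · rw [pvRun_add, pvRun_add]
          show pvRun values 1 (pvRun values k1 (pvRun values 0 (pvStep values _))) = _
          rw [hpush]
          simp only [pvRun_zero]
          rw [hrun1]
          show pvRun values 0 (pvStep values _) = _
          rw [final_step m1 S hok1 (hpre1 _ (by rw [hA0]; rfl)) (by rw [hget1]; rfl)]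
          rfl
        · intro p hp
          exact isSome_insert m1 _ _ p (hpre1 p hp)
    | none =>
      cases hB0 : m.get? (keyP a (a + d)) with
      | some vB =>
        -- only (a+1, a+d+1) missing: push it, solve it, then combine
        have hpush : pvStep values (keyP a (a + (d + 1)) :: S, m)
            = (keyP (a + 1) (a + d + 1) :: keyP a (a + (d + 1)) :: S, m) := by
          show pvStep values ((((a : Nat) : Int), ((a + (d + 1) : Nat) : Int)) :: S, m) = _
          simp only [pvStep, if_neg hij, eA, eB, hA0, hB0]
          simp only [Option.isNone_some, Option.isNone_none, Bool.false_eq_true, if_false,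
            if_true, List.append_nil]
          rw [if_pos (by simp)]
          rfl
        obtain ⟨k1, m1, hk1, hrun1, hok1, hget1, hpre1⟩ :=
          ih (a + 1) (keyP a (a + (d + 1)) :: S) m (by omega) hm
        have e1 : a + 1 + d = a + d + 1 := by omega
        rw [e1] at hrun1 hget1
        refine ⟨1 + k1 + 1, m1.insert (keyP a (a + (d + 1))) (gF values (d + 1) a),
          by rw [Tfun]; omega, ?_, hmemoFin m1 hok1, by rw [PySem.Dict.get?_insert, if_pos rfl], ?_⟩
        · rw [pvRun_add, pvRun_add]
          show pvRun values 1 (pvRun values k1 (pvRun values 0 (pvStep values _))) = _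
          rw [hpush]
          simp only [pvRun_zero]
          rw [hrun1]
          show pvRun values 0 (pvStep values _) = _
          rw [final_step m1 S hok1 (by rw [hget1]; rfl) (hpre1 _ (by rw [hB0]; rfl))]
          rfl
        · intro p hp
          exact isSome_insert m1 _ _ p (hpre1 p hp)
      | none =>
        -- both missing: push both (extend order: (a+1,j) first, so (a,j-1) ends on top), solve both, combine
        have hpush : pvStep values (keyP a (a + (d + 1)) :: S, m)
            = (keyP a (a + d) :: keyP (a + 1) (a + d + 1) :: keyP a (a + (d + 1)) :: S, m) := by
          show pvStep values ((((a : Nat) : Int), ((a + (d + 1) : Nat) : Int)) :: S, m) = _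
          simp only [pvStep, if_neg hij, eA, eB, hA0, hB0]
          simp only [Option.isNone_none, if_true]
          rw [if_pos (by simp)]
          rfl
        obtain ⟨k1, m1, hk1, hrun1, hok1, hget1, hpre1⟩ :=
          ih a (keyP (a + 1) (a + d + 1) :: keyP a (a + (d + 1)) :: S) m (by omega) hm
        obtain ⟨k2, m2, hk2, hrun2, hok2, hget2, hpre2⟩ :=
          ih (a + 1) (keyP a (a + (d + 1)) :: S) m1 (by omega) hok1
        have e1 : a + 1 + d = a + d + 1 := by omega
        rw [e1] at hrun2 hget2
        refine ⟨1 + k1 + k2 + 1, m2.insert (keyP a (a + (d + 1))) (gF values (d + 1) a),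
          by rw [Tfun]; omega, ?_, hmemoFin m2 hok2, by rw [PySem.Dict.get?_insert, if_pos rfl], ?_⟩
        · rw [pvRun_add, pvRun_add, pvRun_add]
          show pvRun values 1 (pvRun values k2 (pvRun values k1 (pvRun values 0 (pvStep values _)))) = _
          rw [hpush]
          simp only [pvRun_zero]
          rw [hrun1, hrun2]
          show pvRun values 0 (pvStep values _) = _
          rw [final_step m2 S hok2 (by rw [hget2]; rfl) (hpre2 _ (by rw [hget1]; rfl))]
          rfl
        · intro p hp
          exact isSome_insert m2 _ _ p (hpre2 p (hpre1 p hp))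

theorem alt_eq (values : List Int) (h : values ≠ []) :
    firstWillWin_alt values = decide (gF values (values.length - 1) 0 > 0) := by
  have hn : 1 ≤ values.length := by
    cases values with
    | nil => exact absurd rfl h
    | cons a t => simp
  obtain ⟨k, m', hk, hrun, _, hget, _⟩ :=
    stack_go values (values.length - 1) 0 [] PySem.Dict.empty (by omega) (memoOK_empty values)
  have hkF : k ≤ 3 * 2 ^ values.length := by
    have h1 := Tfun_le (values.length - 1)
    have h2 : (2 : Nat) ^ (values.length - 1) ≤ 2 ^ values.length :=
      Nat.pow_le_pow_right (by omega) (by omega)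
    omega
  have ekey : ((0 : Int), ((values.length : Int) - 1)) = keyP 0 (0 + (values.length - 1)) := by
    simp only [keyP, Prod.ext_iff]
    constructor <;> push_cast <;> omega
  have hfull : pvRun values (3 * 2 ^ values.length)
      ([keyP 0 (0 + (values.length - 1))], PySem.Dict.empty) = ([], m') := by
    have e : 3 * 2 ^ values.length = k + (3 * 2 ^ values.length - k) := by omega
    rw [e, pvRun_add, hrun, pvRun_nil]
  simp only [firstWillWin_alt, if_neg h]
  rw [ekey, hfull]
  show decide (m'.getD (keyP 0 (0 + (values.length - 1))) 0 > 0) = _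
  rw [PySem.Dict.getD_eq_get?_getD, hget, Option.getD_some]

-- ===== VERDICT (by name: the statement is the Claim_ definition above) =====
theorem firstWillWin_spec : Claim_equal_firstWillWin := by
  intro values _
  unfold Spec_firstWillWin
  by_cases h : values = []
  · subst h; rfl
  · rw [a_eq values h, alt_eq values h]
    have hkey := gF_eq values (values.length - 1) 0
    simp only [decide_eq_decide]
    omega
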